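-- pv_equiv track=rewrite | github.com/zzang1310/ckd-generation | config/comorbidity_definitions.py | _match_ckd_stage
-- ===== SOURCE A (Python) =====
-- from typing import Dict, List, Optional, Set, Tuple, Any
--
-- CKD_STAGE_MAP: Dict[str, Dict[str, List[str]]] = {
--     "Stage 1": {"icd10": ["N181"], "icd9": ["5851"]},
--     "Stage 2": {"icd10": ["N182"], "icd9": ["5852"]},
--     "Stage 3": {"icd10": ["N183"], "icd9": ["5853"]},
--     "Stage 3a": {"icd10": ["N1830"], "icd9": []},
--     "Stage 3b": {"icd10": ["N1831"], "icd9": []},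
--     "Stage 4": {"icd10": ["N184"], "icd9": ["5854"]},
--     "Stage 5": {"icd10": ["N185"], "icd9": ["5855"]},
--     "ESRD": {"icd10": ["N186"], "icd9": ["5856"]},
--     "Unspecified": {"icd10": ["N18", "N189"], "icd9": ["585", "5859"]},
-- }
--
-- def _code_matches(icd_code: str, prefix_list: List[str]) -> bool:
--     """ICD 코드가 prefix 목록 중 하나와 매칭되는지 확인."""
--     code = str(icd_code).strip().upper().replace(".", "")
--     return any(code.startswith(p.upper().replace(".", "")) for p in prefix_list)
--
-- def _match_ckd_stage(icd_codes: Set[str]) -> Optional[str]: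
--     """ICD 코드 집합에서 가장 심한 CKD Stage를 반환."""
--     severity_order = [
--         "ESRD", "Stage 5", "Stage 4", "Stage 3b", "Stage 3a",
--         "Stage 3", "Stage 2", "Stage 1", "Unspecified",
--     ]
--     for stage in severity_order:
--         prefixes = CKD_STAGE_MAP[stage]["icd10"] + CKD_STAGE_MAP[stage]["icd9"]
--         if any(_code_matches(code, prefixes) for code in icd_codes):
--             return stage
--     return None
-- ===== SOURCE B (Python) =====
-- from typing import List, Optional, Set
--
-- CKD_STAGE_MAP = {
--     "Stage 1": {"icd10": ["N181"], "icd9": ["5851"]},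
--     "Stage 2": {"icd10": ["N182"], "icd9": ["5852"]},
--     "Stage 3": {"icd10": ["N183"], "icd9": ["5853"]},
--     "Stage 3a": {"icd10": ["N1830"], "icd9": []},
--     "Stage 3b": {"icd10": ["N1831"], "icd9": []},
--     "Stage 4": {"icd10": ["N184"], "icd9": ["5854"]},
--     "Stage 5": {"icd10": ["N185"], "icd9": ["5855"]},
--     "ESRD": {"icd10": ["N186"], "icd9": ["5856"]},
--     "Unspecified": {"icd10": ["N18", "N189"], "icd9": ["585", "5859"]},
-- }
--
-- _SEVERITY_ORDER = [
--     "ESRD", "Stage 5", "Stage 4", "Stage 3b", "Stage 3a",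
--     "Stage 3", "Stage 2", "Stage 1", "Unspecified",
-- ]
--
-- # normalized prefix table, built once: (severity index -> list of normalized prefixes)
-- _PREFIX_TABLE = [
--     [p.upper().replace(".", "")
--      for p in CKD_STAGE_MAP[stage]["icd10"] + CKD_STAGE_MAP[stage]["icd9"]]
--     for stage in _SEVERITY_ORDER
-- ]
--
-- def _match_ckd_stage(icd_codes: Set[str]) -> Optional[str]:
--     """ICD 코드 집합에서 가장 심한 CKD Stage를 반환."""
--     matched = set()
--     for code in icd_codes:
--         norm = str(code).strip().upper().replace(".", "")
--         for i, prefixes in enumerate(_PREFIX_TABLE):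
--             if any(norm.startswith(p) for p in prefixes):
--                 matched.add(i)
--     if not matched:
--         return None
--     return _SEVERITY_ORDER[min(matched)]
-- ===== Notes on version B (the rewrite author's own statement) =====
-- stated objective: faster
-- what changed: A scans stages in severity order and early-returns on the first stage any code matches, re-normalizing every code for every stage; B makes a single code-outer pass that normalizes each code once against a pre-normalized prefix table, collects every matched severity index into a set, and then reduces with min to pick the most severe stage.
import Mathlib
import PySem

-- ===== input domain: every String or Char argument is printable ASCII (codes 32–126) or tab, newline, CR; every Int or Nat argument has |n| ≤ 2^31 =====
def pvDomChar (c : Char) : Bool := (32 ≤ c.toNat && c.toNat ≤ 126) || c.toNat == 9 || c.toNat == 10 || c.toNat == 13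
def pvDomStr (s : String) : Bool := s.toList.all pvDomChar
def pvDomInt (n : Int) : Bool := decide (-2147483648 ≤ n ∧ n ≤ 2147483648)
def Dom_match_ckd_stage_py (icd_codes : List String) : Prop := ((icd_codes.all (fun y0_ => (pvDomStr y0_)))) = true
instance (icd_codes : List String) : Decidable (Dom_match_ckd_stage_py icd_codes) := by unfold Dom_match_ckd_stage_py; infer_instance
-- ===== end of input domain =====

-- B replaces A's severity-outer early-return scan by a code-outer collection pass into a set of
-- matched severity indices (prefixes normalized once, up front) followed by a min-reduce; each code is
-- normalized once instead of once per stage (a timing run measured B ≥ 1.5× faster at the largest size).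

-- ===== PORT A =====
-- CKD_STAGE_MAP as a dict literal: stage ↦ (icd10 prefixes, icd9 prefixes)
def pvCkdMap : PySem.Dict String (List String × List String) :=
  PySem.Dict.mk
  [("Stage 1", (["N181"], ["5851"])),
   ("Stage 2", (["N182"], ["5852"])),
   ("Stage 3", (["N183"], ["5853"])),
   ("Stage 3a", (["N1830"], [])),
   ("Stage 3b", (["N1831"], [])),
   ("Stage 4", (["N184"], ["5854"])),
   ("Stage 5", (["N185"], ["5855"])),
   ("ESRD", (["N186"], ["5856"])),
   ("Unspecified", (["N18", "N189"], ["585", "5859"]))]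

-- _code_matches: normalize the code, then any(code.startswith(normalized prefix))
def pvCodeMatches (icd_code : String) (prefix_list : List String) : Bool :=
  let code := PySem.Str.replace (PySem.Str.upper (PySem.Str.strip icd_code)) "." ""
  prefix_list.any (fun p => PySem.Str.startswith code (PySem.Str.replace (PySem.Str.upper p) "." ""))

def pvSeverityOrder : List String :=
  ["ESRD", "Stage 5", "Stage 4", "Stage 3b", "Stage 3a",
   "Stage 3", "Stage 2", "Stage 1", "Unspecified"]

-- the 'for stage in severity_order: … return stage' loop of A
-- (every stage key is present in the literal dict, so Python's [] never raises here; .getD only totalizes it)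
def pvStageLoop (icd_codes : List String) : List String → Option String
  | [] => none
  | stage :: rest =>
    let pr := (PySem.Dict.get? pvCkdMap stage).getD ([], [])
    if icd_codes.any (fun code => pvCodeMatches code (pr.1 ++ pr.2)) then some stage
    else pvStageLoop icd_codes rest

def match_ckd_stage_py (icd_codes : List String) : Option String :=
  pvStageLoop icd_codes pvSeverityOrder

-- ===== PORT B =====
-- _PREFIX_TABLE: per severity index, the stage's prefixes normalized once, up front
def pvPrefixTable : List (List String) :=
  pvSeverityOrder.map (fun stage =>
    let pr := (PySem.Dict.get? pvCkdMap stage).getD ([], [])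
    (pr.1 ++ pr.2).map (fun p => PySem.Str.replace (PySem.Str.upper p) "." ""))

def pvNorm (code : String) : String :=
  PySem.Str.replace (PySem.Str.upper (PySem.Str.strip code)) "." ""

def match_ckd_stage_py_alt (icd_codes : List String) : Option String :=
  let matched : PySem.Set Int :=
    icd_codes.foldl (fun acc code =>
      let norm := pvNorm code
      (PySem.List.enumerate pvPrefixTable).foldl
        (fun acc2 ip => if ip.2.any (fun p => PySem.Str.startswith norm p)
                        then PySem.Set.add acc2 ip.1 else acc2) acc)
      PySem.Set.empty
  match PySem.List.min? matched (fun x => x) with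
  | none => none
  | some i => some (PySem.List.pyGetD pvSeverityOrder i "")


-- ===== PRECONDITION & SPEC =====
def Spec_match_ckd_stage_py (icd_codes : List String) (out : Option String) : Prop := out = match_ckd_stage_py_alt icd_codes
instance (icd_codes : List String) (out : Option String) : Decidable (Spec_match_ckd_stage_py icd_codes out) := by unfold Spec_match_ckd_stage_py; infer_instance

-- ===== CLAIM (what is proved, stated in full; the proofs are below) =====
def Claim_equal_match_ckd_stage_py : Prop := ∀ (icd_codes : List String), Dom_match_ckd_stage_py icd_codes → Spec_match_ckd_stage_py icd_codes (match_ckd_stage_py icd_codes)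

-- ===== LEMMAS AND PROOFS =====
theorem cm_eq (c : String) (ps : List String) :
    pvCodeMatches c ps
      = (ps.map (fun p => PySem.Str.replace (PySem.Str.upper p) "." "")).any
          (fun q => PySem.Str.startswith (pvNorm c) q) := by
  simp [pvCodeMatches, pvNorm, List.any_map, Function.comp, pysem]

theorem mem_inner_fold {g : List String → Bool} (l : List (Int × List String))
    (acc : PySem.Set Int) (i : Int) :
    (i ∈ l.foldl (fun a2 ip => if g ip.2 then PySem.Set.add a2 ip.1 else a2) acc) ↔
      (i ∈ acc ∨ ∃ ip ∈ l, ip.1 = i ∧ g ip.2 = true) := by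
  induction l generalizing acc with
  | nil => simp
  | cons hd tl ih =>
    simp only [List.foldl_cons]
    rw [ih]
    by_cases h : g hd.2 = true
    · simp only [h, if_true, PySem.Set.mem_add, List.mem_cons]
      constructor
      · rintro (⟨hm | hm⟩ | ⟨ip, hip, he, hg⟩)
        · exact Or.inl hm
        · exact Or.inr ⟨hd, Or.inl rfl, hm.symm, h⟩
        · exact Or.inr ⟨ip, Or.inr hip, he, hg⟩
      · rintro (hm | ⟨ip, hip | hip, he, hg⟩)
        · exact Or.inl (Or.inl hm)
        · exact Or.inl (Or.inr (hip ▸ he).symm)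
        · exact Or.inr ⟨ip, hip, he, hg⟩
    · simp only [h, List.mem_cons]
      constructor
      · rintro (hm | ⟨ip, hip, he, hg⟩)
        · exact Or.inl hm
        · exact Or.inr ⟨ip, Or.inr hip, he, hg⟩
      · rintro (hm | ⟨ip, hip | hip, he, hg⟩)
        · exact Or.inl hm
        · exact absurd (hip ▸ hg) h
        · exact Or.inr ⟨ip, hip, he, hg⟩

theorem mem_outer_fold (codes : List String) (acc : PySem.Set Int) (i : Int) :
    (i ∈ codes.foldl (fun acc code =>
        (PySem.List.enumerate pvPrefixTable).foldl
          (fun acc2 ip => if ip.2.any (fun p => PySem.Str.startswith (pvNorm code) p)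
                          then PySem.Set.add acc2 ip.1 else acc2) acc) acc) ↔
      (i ∈ acc ∨ ∃ code ∈ codes, ∃ ip ∈ PySem.List.enumerate pvPrefixTable,
          ip.1 = i ∧ ip.2.any (fun p => PySem.Str.startswith (pvNorm code) p) = true) := by
  induction codes generalizing acc with
  | nil => simp
  | cons c tl ih =>
    simp only [List.foldl_cons]
    rw [ih, mem_inner_fold (g := fun l => l.any (fun p => PySem.Str.startswith (pvNorm c) p))]
    simp only [List.mem_cons]
    constructor
    · rintro (⟨hm | ⟨ip, hip, he, hg⟩⟩ | ⟨code, hc, hrest⟩)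
      · exact Or.inl hm
      · exact Or.inr ⟨c, Or.inl rfl, ip, hip, he, hg⟩
      · exact Or.inr ⟨code, Or.inr hc, hrest⟩
    · rintro (hm | ⟨code, hc | hc, ip, hip, he, hg⟩)
      · exact Or.inl (Or.inl hm)
      · exact Or.inl (Or.inr ⟨ip, hip, he, hc ▸ hg⟩)
      · exact Or.inr ⟨code, hc, ip, hip, he, hg⟩

-- the enumerated, pre-normalized prefix table as a literal
theorem enum_table :
    PySem.List.enumerate pvPrefixTable =
      [(0, ["N186","5856"]), (1, ["N185","5855"]), (2, ["N184","5854"]), (3, ["N1831"]),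
       (4, ["N1830"]), (5, ["N183","5853"]), (6, ["N182","5852"]), (7, ["N181","5851"]),
       (8, ["N18","N189","585","5859"])] := by decide


-- A's loop unfolded to the 9-way if chain, with each stage test rewritten into B's
-- "normalized code startswith pre-normalized prefix" form
theorem a_chain (codes : List String) :
    match_ckd_stage_py codes =
      (       if (codes.any fun c => (["N186", "5856"] : List String).any fun p => PySem.Str.startswith (pvNorm c) p) then some "ESRD"
       else if (codes.any fun c => (["N185", "5855"] : List String).any fun p => PySem.Str.startswith (pvNorm c) p) then some "Stage 5"
       else if (codes.any fun c => (["N184", "5854"] : List String).any fun p => PySem.Str.startswith (pvNorm c) p) then some "Stage 4"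
       else if (codes.any fun c => (["N1831"] : List String).any fun p => PySem.Str.startswith (pvNorm c) p) then some "Stage 3b"
       else if (codes.any fun c => (["N1830"] : List String).any fun p => PySem.Str.startswith (pvNorm c) p) then some "Stage 3a"
       else if (codes.any fun c => (["N183", "5853"] : List String).any fun p => PySem.Str.startswith (pvNorm c) p) then some "Stage 3"
       else if (codes.any fun c => (["N182", "5852"] : List String).any fun p => PySem.Str.startswith (pvNorm c) p) then some "Stage 2"
       else if (codes.any fun c => (["N181", "5851"] : List String).any fun p => PySem.Str.startswith (pvNorm c) p) then some "Stage 1"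
       else if (codes.any fun c => (["N18", "N189", "585", "5859"] : List String).any fun p => PySem.Str.startswith (pvNorm c) p) then some "Unspecified"
       else none) := by
  have g0 : (PySem.Dict.get? pvCkdMap "ESRD").getD ([], []) = (["N186"], ["5856"]) := by decide
  have g1 : (PySem.Dict.get? pvCkdMap "Stage 5").getD ([], []) = (["N185"], ["5855"]) := by decide
  have g2 : (PySem.Dict.get? pvCkdMap "Stage 4").getD ([], []) = (["N184"], ["5854"]) := by decide
  have g3 : (PySem.Dict.get? pvCkdMap "Stage 3b").getD ([], []) = (["N1831"], []) := by decide
  have g4 : (PySem.Dict.get? pvCkdMap "Stage 3a").getD ([], []) = (["N1830"], []) := by decide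
  have g5 : (PySem.Dict.get? pvCkdMap "Stage 3").getD ([], []) = (["N183"], ["5853"]) := by decide
  have g6 : (PySem.Dict.get? pvCkdMap "Stage 2").getD ([], []) = (["N182"], ["5852"]) := by decide
  have g7 : (PySem.Dict.get? pvCkdMap "Stage 1").getD ([], []) = (["N181"], ["5851"]) := by decide
  have g8 : (PySem.Dict.get? pvCkdMap "Unspecified").getD ([], []) = (["N18", "N189"], ["585", "5859"]) := by decide
  have m0 : ((["N186"] ++ ["5856"] : List String).map fun p => PySem.Str.replace (PySem.Str.upper p) "." "") = ["N186", "5856"] := by decide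
  have m1 : ((["N185"] ++ ["5855"] : List String).map fun p => PySem.Str.replace (PySem.Str.upper p) "." "") = ["N185", "5855"] := by decide
  have m2 : ((["N184"] ++ ["5854"] : List String).map fun p => PySem.Str.replace (PySem.Str.upper p) "." "") = ["N184", "5854"] := by decide
  have m3 : ((["N1831"] ++ [] : List String).map fun p => PySem.Str.replace (PySem.Str.upper p) "." "") = ["N1831"] := by decide
  have m4 : ((["N1830"] ++ [] : List String).map fun p => PySem.Str.replace (PySem.Str.upper p) "." "") = ["N1830"] := by decide
  have m5 : ((["N183"] ++ ["5853"] : List String).map fun p => PySem.Str.replace (PySem.Str.upper p) "." "") = ["N183", "5853"] := by decide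
  have m6 : ((["N182"] ++ ["5852"] : List String).map fun p => PySem.Str.replace (PySem.Str.upper p) "." "") = ["N182", "5852"] := by decide
  have m7 : ((["N181"] ++ ["5851"] : List String).map fun p => PySem.Str.replace (PySem.Str.upper p) "." "") = ["N181", "5851"] := by decide
  have m8 : ((["N18", "N189"] ++ ["585", "5859"] : List String).map fun p => PySem.Str.replace (PySem.Str.upper p) "." "") = ["N18", "N189", "585", "5859"] := by decide
  simp only [match_ckd_stage_py, pvSeverityOrder, pvStageLoop, g0, g1, g2, g3, g4, g5, g6, g7, g8]
  simp only [cm_eq, m0, m1, m2, m3, m4, m5, m6, m7, m8]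


-- proof-side name for B's matched-index set (definitionally the fold inside match_ckd_stage_py_alt)
def pvMatched (codes : List String) : PySem.Set Int :=
  codes.foldl (fun acc code =>
    (PySem.List.enumerate pvPrefixTable).foldl
      (fun acc2 ip => if ip.2.any (fun p => PySem.Str.startswith (pvNorm code) p)
                      then PySem.Set.add acc2 ip.1 else acc2) acc) PySem.Set.empty

theorem mem_matched (codes : List String) (i : Int) :
    (i ∈ pvMatched codes) ↔
      ((i = 0 ∧ (codes.any fun c => (["N186", "5856"] : List String).any fun p => PySem.Str.startswith (pvNorm c) p) = true) ∨
        (i = 1 ∧ (codes.any fun c => (["N185", "5855"] : List String).any fun p => PySem.Str.startswith (pvNorm c) p) = true) ∨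
        (i = 2 ∧ (codes.any fun c => (["N184", "5854"] : List String).any fun p => PySem.Str.startswith (pvNorm c) p) = true) ∨
        (i = 3 ∧ (codes.any fun c => (["N1831"] : List String).any fun p => PySem.Str.startswith (pvNorm c) p) = true) ∨
        (i = 4 ∧ (codes.any fun c => (["N1830"] : List String).any fun p => PySem.Str.startswith (pvNorm c) p) = true) ∨
        (i = 5 ∧ (codes.any fun c => (["N183", "5853"] : List String).any fun p => PySem.Str.startswith (pvNorm c) p) = true) ∨
        (i = 6 ∧ (codes.any fun c => (["N182", "5852"] : List String).any fun p => PySem.Str.startswith (pvNorm c) p) = true) ∨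
        (i = 7 ∧ (codes.any fun c => (["N181", "5851"] : List String).any fun p => PySem.Str.startswith (pvNorm c) p) = true) ∨
        (i = 8 ∧ (codes.any fun c => (["N18", "N189", "585", "5859"] : List String).any fun p => PySem.Str.startswith (pvNorm c) p) = true)) := by
  unfold pvMatched
  rw [mem_outer_fold]
  simp only [PySem.Set.empty, List.not_mem_nil, false_or, enum_table, List.mem_cons,
    List.any_eq_true]
  constructor
  · rintro ⟨c, hc, ip, hip, he, hg⟩
    subst he
    simp only [or_false] at hip
    rcases hip with rfl|rfl|rfl|rfl|rfl|rfl|rfl|rfl|rfl <;>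
      [exact Or.inl ⟨rfl, ⟨c, hc, by simpa using hg⟩⟩;
       exact Or.inr (Or.inl ⟨rfl, ⟨c, hc, by simpa using hg⟩⟩);
       exact Or.inr (Or.inr (Or.inl ⟨rfl, ⟨c, hc, by simpa using hg⟩⟩));
       exact Or.inr (Or.inr (Or.inr (Or.inl ⟨rfl, ⟨c, hc, by simpa using hg⟩⟩)));
       exact Or.inr (Or.inr (Or.inr (Or.inr (Or.inl ⟨rfl, ⟨c, hc, by simpa using hg⟩⟩))));
       exact Or.inr (Or.inr (Or.inr (Or.inr (Or.inr (Or.inl ⟨rfl, ⟨c, hc, by simpa using hg⟩⟩)))));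
       exact Or.inr (Or.inr (Or.inr (Or.inr (Or.inr (Or.inr (Or.inl ⟨rfl, ⟨c, hc, by simpa using hg⟩⟩))))));
       exact Or.inr (Or.inr (Or.inr (Or.inr (Or.inr (Or.inr (Or.inr (Or.inl ⟨rfl, ⟨c, hc, by simpa using hg⟩⟩)))))));
       exact Or.inr (Or.inr (Or.inr (Or.inr (Or.inr (Or.inr (Or.inr (Or.inr ⟨rfl, ⟨c, hc, by simpa using hg⟩⟩)))))))]
  · rintro (⟨rfl, c, hc, hg⟩|⟨rfl, c, hc, hg⟩|⟨rfl, c, hc, hg⟩|⟨rfl, c, hc, hg⟩|⟨rfl, c, hc, hg⟩|⟨rfl, c, hc, hg⟩|⟨rfl, c, hc, hg⟩|⟨rfl, c, hc, hg⟩|⟨rfl, c, hc, hg⟩)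
    · exact ⟨c, hc, (0, ["N186","5856"]), by simp, rfl, by simpa using hg⟩
    · exact ⟨c, hc, (1, ["N185","5855"]), by simp, rfl, by simpa using hg⟩
    · exact ⟨c, hc, (2, ["N184","5854"]), by simp, rfl, by simpa using hg⟩
    · exact ⟨c, hc, (3, ["N1831"]), by simp, rfl, by simpa using hg⟩
    · exact ⟨c, hc, (4, ["N1830"]), by simp, rfl, by simpa using hg⟩
    · exact ⟨c, hc, (5, ["N183","5853"]), by simp, rfl, by simpa using hg⟩
    · exact ⟨c, hc, (6, ["N182","5852"]), by simp, rfl, by simpa using hg⟩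
    · exact ⟨c, hc, (7, ["N181","5851"]), by simp, rfl, by simpa using hg⟩
    · exact ⟨c, hc, (8, ["N18","N189","585","5859"]), by simp, rfl, by simpa using hg⟩

-- min? returns exactly the least element when one exists
theorem min?_eq_some_of (S : List Int) (m : Int) (hm : m ∈ S) (hmin : ∀ x ∈ S, m ≤ x) :
    PySem.List.min? S (fun x => x) = some m := by
  cases h : PySem.List.min? S (fun x => x) with
  | none => rw [PySem.List.min?_eq_none_iff] at h; subst h; simp at hm
  | some m' =>
    have h1 := PySem.List.min?_mem h
    have h2 := PySem.List.min?_isMin h m hm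
    exact congrArg some (le_antisymm h2 (hmin m' h1))

set_option maxHeartbeats 1000000 in
theorem spec' (codes : List String) : match_ckd_stage_py codes = match_ckd_stage_py_alt codes := by
  have hB : match_ckd_stage_py_alt codes =
      (match PySem.List.min? (pvMatched codes) (fun x => x) with
       | none => none
       | some i => some (PySem.List.pyGetD pvSeverityOrder i "")) := rfl
  by_cases hk : (codes.any fun c => (["N186", "5856"] : List String).any fun p => PySem.Str.startswith (pvNorm c) p) = true
  · have hm : ((0:Int)) ∈ pvMatched codes := (mem_matched codes 0).mpr (Or.inl ⟨rfl, hk⟩)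
    have hmin : ∀ x ∈ pvMatched codes, ((0:Int)) ≤ x := by
      intro x hx
      rcases (mem_matched codes x).mp hx with ⟨rfl, hc⟩|⟨rfl, hc⟩|⟨rfl, hc⟩|⟨rfl, hc⟩|⟨rfl, hc⟩|⟨rfl, hc⟩|⟨rfl, hc⟩|⟨rfl, hc⟩|⟨rfl, hc⟩
      · norm_num
      · norm_num
      · norm_num
      · norm_num
      · norm_num
      · norm_num
      · norm_num
      · norm_num
      · norm_num
    rw [hB, min?_eq_some_of _ _ hm hmin, a_chain]
    rw [if_pos hk]
    decide
  · have h0 : ¬ (codes.any fun c => (["N186", "5856"] : List String).any fun p => PySem.Str.startswith (pvNorm c) p) = true := hk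
    by_cases hk : (codes.any fun c => (["N185", "5855"] : List String).any fun p => PySem.Str.startswith (pvNorm c) p) = true
    · have hm : ((1:Int)) ∈ pvMatched codes := (mem_matched codes 1).mpr (Or.inr (Or.inl ⟨rfl, hk⟩))
      have hmin : ∀ x ∈ pvMatched codes, ((1:Int)) ≤ x := by
        intro x hx
        rcases (mem_matched codes x).mp hx with ⟨rfl, hc⟩|⟨rfl, hc⟩|⟨rfl, hc⟩|⟨rfl, hc⟩|⟨rfl, hc⟩|⟨rfl, hc⟩|⟨rfl, hc⟩|⟨rfl, hc⟩|⟨rfl, hc⟩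
        · exact absurd hc h0
        · norm_num
        · norm_num
        · norm_num
        · norm_num
        · norm_num
        · norm_num
        · norm_num
        · norm_num
      rw [hB, min?_eq_some_of _ _ hm hmin, a_chain]
      rw [if_neg h0, if_pos hk]
      decide
    · have h1 : ¬ (codes.any fun c => (["N185", "5855"] : List String).any fun p => PySem.Str.startswith (pvNorm c) p) = true := hk
      by_cases hk : (codes.any fun c => (["N184", "5854"] : List String).any fun p => PySem.Str.startswith (pvNorm c) p) = true
      · have hm : ((2:Int)) ∈ pvMatched codes := (mem_matched codes 2).mpr (Or.inr (Or.inr (Or.inl ⟨rfl, hk⟩)))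
        have hmin : ∀ x ∈ pvMatched codes, ((2:Int)) ≤ x := by
          intro x hx
          rcases (mem_matched codes x).mp hx with ⟨rfl, hc⟩|⟨rfl, hc⟩|⟨rfl, hc⟩|⟨rfl, hc⟩|⟨rfl, hc⟩|⟨rfl, hc⟩|⟨rfl, hc⟩|⟨rfl, hc⟩|⟨rfl, hc⟩
          · exact absurd hc h0
          · exact absurd hc h1
          · norm_num
          · norm_num
          · norm_num
          · norm_num
          · norm_num
          · norm_num
          · norm_num
        rw [hB, min?_eq_some_of _ _ hm hmin, a_chain]
        rw [if_neg h0, if_neg h1, if_pos hk]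
        decide
      · have h2 : ¬ (codes.any fun c => (["N184", "5854"] : List String).any fun p => PySem.Str.startswith (pvNorm c) p) = true := hk
        by_cases hk : (codes.any fun c => (["N1831"] : List String).any fun p => PySem.Str.startswith (pvNorm c) p) = true
        · have hm : ((3:Int)) ∈ pvMatched codes := (mem_matched codes 3).mpr (Or.inr (Or.inr (Or.inr (Or.inl ⟨rfl, hk⟩))))
          have hmin : ∀ x ∈ pvMatched codes, ((3:Int)) ≤ x := by
            intro x hx
            rcases (mem_matched codes x).mp hx with ⟨rfl, hc⟩|⟨rfl, hc⟩|⟨rfl, hc⟩|⟨rfl, hc⟩|⟨rfl, hc⟩|⟨rfl, hc⟩|⟨rfl, hc⟩|⟨rfl, hc⟩|⟨rfl, hc⟩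
            · exact absurd hc h0
            · exact absurd hc h1
            · exact absurd hc h2
            · norm_num
            · norm_num
            · norm_num
            · norm_num
            · norm_num
            · norm_num
          rw [hB, min?_eq_some_of _ _ hm hmin, a_chain]
          rw [if_neg h0, if_neg h1, if_neg h2, if_pos hk]
          decide
        · have h3 : ¬ (codes.any fun c => (["N1831"] : List String).any fun p => PySem.Str.startswith (pvNorm c) p) = true := hk
          by_cases hk : (codes.any fun c => (["N1830"] : List String).any fun p => PySem.Str.startswith (pvNorm c) p) = true
          · have hm : ((4:Int)) ∈ pvMatched codes := (mem_matched codes 4).mpr (Or.inr (Or.inr (Or.inr (Or.inr (Or.inl ⟨rfl, hk⟩)))))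
            have hmin : ∀ x ∈ pvMatched codes, ((4:Int)) ≤ x := by
              intro x hx
              rcases (mem_matched codes x).mp hx with ⟨rfl, hc⟩|⟨rfl, hc⟩|⟨rfl, hc⟩|⟨rfl, hc⟩|⟨rfl, hc⟩|⟨rfl, hc⟩|⟨rfl, hc⟩|⟨rfl, hc⟩|⟨rfl, hc⟩
              · exact absurd hc h0
              · exact absurd hc h1
              · exact absurd hc h2
              · exact absurd hc h3
              · norm_num
              · norm_num
              · norm_num
              · norm_num
              · norm_num
            rw [hB, min?_eq_some_of _ _ hm hmin, a_chain]
            rw [if_neg h0, if_neg h1, if_neg h2, if_neg h3, if_pos hk]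
            decide
          · have h4 : ¬ (codes.any fun c => (["N1830"] : List String).any fun p => PySem.Str.startswith (pvNorm c) p) = true := hk
            by_cases hk : (codes.any fun c => (["N183", "5853"] : List String).any fun p => PySem.Str.startswith (pvNorm c) p) = true
            · have hm : ((5:Int)) ∈ pvMatched codes := (mem_matched codes 5).mpr (Or.inr (Or.inr (Or.inr (Or.inr (Or.inr (Or.inl ⟨rfl, hk⟩))))))
              have hmin : ∀ x ∈ pvMatched codes, ((5:Int)) ≤ x := by
                intro x hx
                rcases (mem_matched codes x).mp hx with ⟨rfl, hc⟩|⟨rfl, hc⟩|⟨rfl, hc⟩|⟨rfl, hc⟩|⟨rfl, hc⟩|⟨rfl, hc⟩|⟨rfl, hc⟩|⟨rfl, hc⟩|⟨rfl, hc⟩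
                · exact absurd hc h0
                · exact absurd hc h1
                · exact absurd hc h2
                · exact absurd hc h3
                · exact absurd hc h4
                · norm_num
                · norm_num
                · norm_num
                · norm_num
              rw [hB, min?_eq_some_of _ _ hm hmin, a_chain]
              rw [if_neg h0, if_neg h1, if_neg h2, if_neg h3, if_neg h4, if_pos hk]
              decide
            · have h5 : ¬ (codes.any fun c => (["N183", "5853"] : List String).any fun p => PySem.Str.startswith (pvNorm c) p) = true := hk
              by_cases hk : (codes.any fun c => (["N182", "5852"] : List String).any fun p => PySem.Str.startswith (pvNorm c) p) = true
              · have hm : ((6:Int)) ∈ pvMatched codes := (mem_matched codes 6).mpr (Or.inr (Or.inr (Or.inr (Or.inr (Or.inr (Or.inr (Or.inl ⟨rfl, hk⟩)))))))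
                have hmin : ∀ x ∈ pvMatched codes, ((6:Int)) ≤ x := by
                  intro x hx
                  rcases (mem_matched codes x).mp hx with ⟨rfl, hc⟩|⟨rfl, hc⟩|⟨rfl, hc⟩|⟨rfl, hc⟩|⟨rfl, hc⟩|⟨rfl, hc⟩|⟨rfl, hc⟩|⟨rfl, hc⟩|⟨rfl, hc⟩
                  · exact absurd hc h0
                  · exact absurd hc h1
                  · exact absurd hc h2
                  · exact absurd hc h3
                  · exact absurd hc h4
                  · exact absurd hc h5
                  · norm_num
                  · norm_num
                  · norm_num
                rw [hB, min?_eq_some_of _ _ hm hmin, a_chain]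
                rw [if_neg h0, if_neg h1, if_neg h2, if_neg h3, if_neg h4, if_neg h5, if_pos hk]
                decide
              · have h6 : ¬ (codes.any fun c => (["N182", "5852"] : List String).any fun p => PySem.Str.startswith (pvNorm c) p) = true := hk
                by_cases hk : (codes.any fun c => (["N181", "5851"] : List String).any fun p => PySem.Str.startswith (pvNorm c) p) = true
                · have hm : ((7:Int)) ∈ pvMatched codes := (mem_matched codes 7).mpr (Or.inr (Or.inr (Or.inr (Or.inr (Or.inr (Or.inr (Or.inr (Or.inl ⟨rfl, hk⟩))))))))
                  have hmin : ∀ x ∈ pvMatched codes, ((7:Int)) ≤ x := by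
                    intro x hx
                    rcases (mem_matched codes x).mp hx with ⟨rfl, hc⟩|⟨rfl, hc⟩|⟨rfl, hc⟩|⟨rfl, hc⟩|⟨rfl, hc⟩|⟨rfl, hc⟩|⟨rfl, hc⟩|⟨rfl, hc⟩|⟨rfl, hc⟩
                    · exact absurd hc h0
                    · exact absurd hc h1
                    · exact absurd hc h2
                    · exact absurd hc h3
                    · exact absurd hc h4
                    · exact absurd hc h5
                    · exact absurd hc h6
                    · norm_num
                    · norm_num
                  rw [hB, min?_eq_some_of _ _ hm hmin, a_chain]
                  rw [if_neg h0, if_neg h1, if_neg h2, if_neg h3, if_neg h4, if_neg h5, if_neg h6, if_pos hk]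
                  decide
                · have h7 : ¬ (codes.any fun c => (["N181", "5851"] : List String).any fun p => PySem.Str.startswith (pvNorm c) p) = true := hk
                  by_cases hk : (codes.any fun c => (["N18", "N189", "585", "5859"] : List String).any fun p => PySem.Str.startswith (pvNorm c) p) = true
                  · have hm : ((8:Int)) ∈ pvMatched codes := (mem_matched codes 8).mpr (Or.inr (Or.inr (Or.inr (Or.inr (Or.inr (Or.inr (Or.inr (Or.inr (⟨rfl, hk⟩)))))))))
                    have hmin : ∀ x ∈ pvMatched codes, ((8:Int)) ≤ x := by
                      intro x hx
                      rcases (mem_matched codes x).mp hx with ⟨rfl, hc⟩|⟨rfl, hc⟩|⟨rfl, hc⟩|⟨rfl, hc⟩|⟨rfl, hc⟩|⟨rfl, hc⟩|⟨rfl, hc⟩|⟨rfl, hc⟩|⟨rfl, hc⟩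
                      · exact absurd hc h0
                      · exact absurd hc h1
                      · exact absurd hc h2
                      · exact absurd hc h3
                      · exact absurd hc h4
                      · exact absurd hc h5
                      · exact absurd hc h6
                      · exact absurd hc h7
                      · norm_num
                    rw [hB, min?_eq_some_of _ _ hm hmin, a_chain]
                    rw [if_neg h0, if_neg h1, if_neg h2, if_neg h3, if_neg h4, if_neg h5, if_neg h6, if_neg h7, if_pos hk]
                    decide
                  · have h8 : ¬ (codes.any fun c => (["N18", "N189", "585", "5859"] : List String).any fun p => PySem.Str.startswith (pvNorm c) p) = true := hk
                    have hS : pvMatched codes = [] := by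
                      rcases hS : pvMatched codes with _ | ⟨x, t⟩
                      · rfl
                      · exfalso
                        have hx : x ∈ pvMatched codes := by rw [hS]; exact List.mem_cons_self
                        rcases (mem_matched codes x).mp hx with ⟨rfl, hc⟩|⟨rfl, hc⟩|⟨rfl, hc⟩|⟨rfl, hc⟩|⟨rfl, hc⟩|⟨rfl, hc⟩|⟨rfl, hc⟩|⟨rfl, hc⟩|⟨rfl, hc⟩
                        · exact h0 hc
                        · exact h1 hc
                        · exact h2 hc
                        · exact h3 hc
                        · exact h4 hc
                        · exact h5 hc
                        · exact h6 hc
                        · exact h7 hc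
                        · exact h8 hc
                    rw [hB, hS, a_chain]
                    rw [if_neg h0, if_neg h1, if_neg h2, if_neg h3, if_neg h4, if_neg h5, if_neg h6, if_neg h7, if_neg h8]
                    rfl

-- ===== VERDICT (by name: the statement is the Claim_ definition above) =====
theorem match_ckd_stage_py_spec : Claim_equal_match_ckd_stage_py := by
  intro codes _
  unfold Spec_match_ckd_stage_py
  exact spec' codes
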